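-- pv_equiv track=rewrite | github.com/uukuguy/speechless | speechless/data_selection/nuggets/nuggets.py | tabular_pretty_print
-- ===== SOURCE A (Python) =====
-- def tabular_pretty_print(grid):
--     lens = [max(map(len, col)) for col in zip(*grid)]
--
--     fmt = " | ".join("{{:{}}}".format(x) for x in lens)
--     table = [fmt.format(*row) for row in grid]
--
--     sep = ["~" * len(table[0])]
--     table = sep + table + sep
--
--     res = []
--     for idx, line in enumerate(table):
--         if idx == 0 or idx == len(table) - 1:
--             ps = "* {} *".format(line)
--         else:
--             ps = "| {} |".format(line)
--         res.append(ps)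
--     return res
-- ===== SOURCE B (Python) =====
-- def tabular_pretty_print(grid):
--     # Build the body lines incrementally, one COLUMN at a time (transposed traversal):
--     # each column is padded to its own max width and appended to every partial line.
--     lines = [""] * len(grid)
--     first = True
--     for col in zip(*grid):
--         w = max(map(len, col))
--         padded = [c + " " * (w - len(c)) for c in col]
--         lines = [p if first else line + " | " + p for line, p in zip(lines, padded)]
--         first = False
--     sep = "~" * len(lines[0])
--     edge = "* {} *".format(sep)
--     return [edge] + ["| {} |".format(line) for line in lines] + [edge]
-- ===== Notes on version B (the rewrite author's own statement) =====
-- stated objective: alternative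
-- what changed: B builds the body lines incrementally column by column (transposed traversal with an accumulator of partial lines, each column padded to its max width as it is appended), instead of A's row-major pass that first computes all widths, builds a dynamic format string and formats each row with .format(*row).
import Mathlib
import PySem

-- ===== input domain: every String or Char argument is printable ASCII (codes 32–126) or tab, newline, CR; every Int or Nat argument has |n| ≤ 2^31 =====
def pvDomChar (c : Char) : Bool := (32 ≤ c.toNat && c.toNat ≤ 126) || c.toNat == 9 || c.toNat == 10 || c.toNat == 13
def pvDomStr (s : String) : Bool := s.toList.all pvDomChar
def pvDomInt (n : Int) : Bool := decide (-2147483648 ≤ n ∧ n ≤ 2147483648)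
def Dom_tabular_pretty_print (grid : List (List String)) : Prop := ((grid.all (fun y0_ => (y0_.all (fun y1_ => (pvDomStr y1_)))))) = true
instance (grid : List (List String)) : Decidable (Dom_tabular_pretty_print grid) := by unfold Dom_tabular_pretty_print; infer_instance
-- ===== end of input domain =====

-- B builds the body lines incrementally column by column (transposed traversal with an
-- accumulator of partial lines), instead of A's row-major dynamic-format-string pass (alternative; same cost).

-- shared port of the left-justify padding both '{:w}'.format(cell) and explicit ' '-padding perform (exact for ASCII)
def pvPad (c : List Char) (w : Nat) : List Char := c ++ List.replicate (w - c.length) ' '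

-- termination helper for pvZipStar (cited by its decreasing_by)
theorem pvZipStar_dec (rows : List (List (List Char))) (hne : rows ≠ [])
    (hall : rows.any (fun r => r.isEmpty) = false) :
    ((rows.map (fun r => r.tail)).map List.length).sum < (rows.map List.length).sum := by
  match rows with
  | [] => exact absurd rfl hne
  | r :: rest =>
    simp only [List.any_cons, Bool.or_eq_false_iff] at hall
    have hr : r ≠ [] := by
      intro h; subst h; simp at hall
    have h1 : r.tail.length < r.length := by
      cases r with
      | nil => exact absurd rfl hr
      | cons a t => simp
    have h2 : ((rest.map (fun r => r.tail)).map List.length).sum ≤ (rest.map List.length).sum := by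
      simp only [List.map_map]
      apply List.sum_le_sum
      intro x _
      simp only [Function.comp, List.length_tail]
      omega
    simp only [List.map_cons, List.sum_cons]
    omega

-- zip(*grid): tuples of the rows' heads until some row is exhausted (exact port of Python zip semantics; used by both Pythons)
def pvZipStar (rows : List (List (List Char))) : List (List (List Char)) :=
  if h : rows = [] then []
  else if h2 : rows.any (fun r => r.isEmpty) then []
  else (rows.map (fun r => r.headD [])) :: pvZipStar (rows.map (fun r => r.tail))
termination_by (rows.map List.length).sum
decreasing_by
  have h2' : rows.any (fun r => r.isEmpty) = false := by
    simp only [Bool.not_eq_true] at h2; exact h2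
  simpa using pvZipStar_dec rows h h2'

-- ===== PORT A =====
def tabular_pretty_print (grid : List (List String)) : List String :=
  -- work on code-point lists (strings are printable ASCII on Dom)
  let g := grid.map (fun row => row.map String.toList)
  -- lens = [max(map(len, col)) for col in zip(*grid)]  (each col is nonempty when it exists)
  let lens := (pvZipStar g).map (fun col => (PySem.List.max? (col.map List.length) (fun y => y)).getD 0)
  -- fmt = " | ".join("{{:{}}}".format(x) for x in lens); table = [fmt.format(*row) for row in grid]:
  -- the i-th placeholder pads row[i] to width lens[i] (IndexError impossible: len(lens) = min row length)
  let table := g.map (fun row =>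
    PySem.Chars.join [' ', '|', ' ']
      ((List.range lens.length).map (fun i => pvPad (row.getD i []) (lens.getD i 0))))
  -- sep = ["~" * len(table[0])]; table[0] raises IndexError for grid = [] (outside Pre_; headD default arbitrary)
  let sep := List.replicate (table.headD []).length '~'
  let table2 := [sep] ++ table ++ [sep]
  -- for idx, line in enumerate(table): edge rows '* {} *', interior '| {} |'
  let res := (PySem.List.enumerate table2 0).foldl
    (fun (res : List (List Char)) (p : Int × List Char) => res ++ [if p.1 = 0 ∨ p.1 = (table2.length : Int) - 1
                          then ['*', ' '] ++ p.2 ++ [' ', '*']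
                          else ['|', ' '] ++ p.2 ++ [' ', '|']]) ([] : List (List Char))
  res.map String.mk

-- ===== PORT B =====
-- one iteration of B's column loop: pad the column to its max width and append it to every partial line
def pvColStep (st : List (List Char) × Bool) (col : List (List Char)) : List (List Char) × Bool :=
  let w := (PySem.List.max? (col.map List.length) (fun y => y)).getD 0
  let padded := col.map (fun c => pvPad c w)
  ((st.1.zip padded).map (fun p => if st.2 then p.2 else p.1 ++ [' ', '|', ' '] ++ p.2), false)

def tabular_pretty_print_alt (grid : List (List String)) : List String :=
  let g := grid.map (fun row => row.map String.toList)
  -- lines = [""] * len(grid); first = True; for col in zip(*grid): … (column-major accumulation)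
  let st := (pvZipStar g).foldl pvColStep (List.replicate grid.length ([] : List Char), true)
  let lines := st.1
  -- sep = "~" * len(lines[0]); raises IndexError for grid = [] (outside Pre_; headD default arbitrary)
  let sep := List.replicate (lines.headD []).length '~'
  let edge := ['*', ' '] ++ sep ++ [' ', '*']
  String.mk edge :: lines.map (fun line => String.mk (['|', ' '] ++ line ++ [' ', '|'])) ++ [String.mk edge]

-- ===== PRECONDITION & SPEC =====
-- Pre_ excludes only the empty grid, on which both A and B raise IndexError (table[0] / lines[0]).
def Pre_tabular_pretty_print (grid : List (List String)) : Prop := grid ≠ []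
instance (grid : List (List String)) : Decidable (Pre_tabular_pretty_print grid) := by unfold Pre_tabular_pretty_print; infer_instance
def pvWitness_tabular_pretty_print : List (List String) := [["a"]]

def Spec_tabular_pretty_print (grid : List (List String)) (out : List String) : Prop := out = tabular_pretty_print_alt grid
instance (grid : List (List String)) (out : List String) : Decidable (Spec_tabular_pretty_print grid out) := by unfold Spec_tabular_pretty_print; infer_instance

-- ===== CLAIM (what is proved, stated in full; the proofs are below) =====
def Claim_equal_tabular_pretty_print : Prop := ∀ (grid : List (List String)), Dom_tabular_pretty_print grid → Pre_tabular_pretty_print grid → Spec_tabular_pretty_print grid (tabular_pretty_print grid)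

-- ===== LEMMAS AND PROOFS =====

-- the minimum row length (= number of columns zip(*grid) yields)
def pvMinLen (rows : List (List (List Char))) : Nat :=
  (PySem.List.min? (rows.map List.length) (fun y => y)).getD 0

theorem pvMinLen_cons (r : List (List Char)) (rest : List (List (List Char))) :
    pvMinLen (r :: rest) = (rest.map List.length).foldl min r.length := by
  simp [pvMinLen, PySem.List.min?_id_cons]

theorem pvMinLen_le_mem (rows : List (List (List Char))) (r : List (List Char)) (h : r ∈ rows) :
    pvMinLen rows ≤ r.length := by
  match rows with
  | [] => cases h
  | x :: t =>
    rw [pvMinLen_cons]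
    rcases List.mem_cons.mp h with h | h
    · subst h; exact (PySem.List.foldl_min_le (t.map List.length) r.length).1
    · exact (PySem.List.foldl_min_le (t.map List.length) x.length).2 r.length (List.mem_map_of_mem h)

theorem pvMinLen_eq_zero (rows : List (List (List Char))) (h : rows.any (fun r => r.isEmpty) = true) :
    pvMinLen rows = 0 := by
  rcases List.any_eq_true.mp h with ⟨r, hr, he⟩
  have := pvMinLen_le_mem rows r hr
  simp only [List.isEmpty_iff] at he
  subst he
  simpa using this

theorem foldl_min_sub_one (xs : List Nat) (a : Nat) (ha : 1 ≤ a) (hxs : ∀ x ∈ xs, 1 ≤ x) :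
    ((xs.map (fun x => x - 1)).foldl min (a - 1)) = (xs.foldl min a) - 1 := by
  induction xs generalizing a with
  | nil => rfl
  | cons x t ih =>
    simp only [List.map_cons, List.foldl_cons]
    have hx := hxs x (List.mem_cons_self ..)
    have : min (a - 1) (x - 1) = min a x - 1 := by omega
    rw [this]
    exact ih (min a x) (by omega) (fun y hy => hxs y (List.mem_cons_of_mem _ hy))

theorem pvMinLen_tail (rows : List (List (List Char))) (hne : rows ≠ [])
    (hall : rows.any (fun r => r.isEmpty) = false) :
    pvMinLen rows = pvMinLen (rows.map (fun r => r.tail)) + 1 := by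
  match rows with
  | [] => exact absurd rfl hne
  | r :: rest =>
    simp only [List.any_cons, Bool.or_eq_false_iff] at hall
    have hr : 1 ≤ r.length := by
      cases r with
      | nil => simp at hall
      | cons a t => simp
    have hrest : ∀ x ∈ rest.map List.length, 1 ≤ x := by
      intro x hx
      rcases List.mem_map.mp hx with ⟨y, hy, rfl⟩
      have : y.isEmpty = false := by
        have := List.any_eq_false.mp hall.2 y hy
        simp only [Bool.not_eq_true] at this
        exact this
      cases y with
      | nil => simp at this
      | cons a t => simp
    rw [List.map_cons, pvMinLen_cons, pvMinLen_cons]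
    have : (rest.map (fun r => r.tail)).map List.length = (rest.map List.length).map (fun x => x - 1) := by
      simp only [List.map_map]; apply List.map_congr_left; intro x _
      simp [Function.comp, List.length_tail]
    rw [this, List.length_tail, foldl_min_sub_one (rest.map List.length) r.length hr hrest]
    have hfold : 1 ≤ (rest.map List.length).foldl min r.length := by
      rcases PySem.List.foldl_min_mem (rest.map List.length) r.length with h | h
      · omega
      · exact hrest _ h
    omega

-- zip(*rows) described column-wise
theorem pvZipStar_eq (rows : List (List (List Char))) :
    pvZipStar rows = (List.range (pvMinLen rows)).map (fun c => rows.map (fun r => r.getD c [])) := by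
  suffices H : ∀ n (rows : List (List (List Char))), (rows.map List.length).sum = n →
      pvZipStar rows = (List.range (pvMinLen rows)).map (fun c => rows.map (fun r => r.getD c [])) by
    exact H _ rows rfl
  intro n
  induction n using Nat.strong_induction_on with
  | _ n ih =>
    intro rows hn
    by_cases h : rows = []
    · subst h
      have hnone : PySem.List.min? ([] : List Nat) (fun y => y) = none := by
        rw [PySem.List.min?_eq_none_iff]
      simp [pvZipStar, pvMinLen, hnone]
    · by_cases h2 : rows.any (fun r => r.isEmpty) = true
      · rw [pvZipStar]
        rw [dif_neg h, dif_pos h2, pvMinLen_eq_zero rows h2]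
        simp
      · have h2' : rows.any (fun r => r.isEmpty) = false := by
          simp only [Bool.not_eq_true] at h2; exact h2
        rw [pvZipStar]
        rw [dif_neg h, dif_neg h2]
        have hdec := pvZipStar_dec rows h h2'
        rw [ih _ (hn ▸ hdec) (rows.map (fun r => r.tail)) rfl, pvMinLen_tail rows h h2']
        rw [List.range_succ_eq_map]
        simp only [List.map_cons, List.map_map]
        congr 1
        · apply List.map_congr_left
          intro r hr
          have : r.isEmpty = false := by
            have := List.any_eq_false.mp h2' r hr
            simp only [Bool.not_eq_true] at this
            exact this
          cases r with
          | nil => simp at this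
          | cons a t => simp
        · apply List.map_congr_left
          intro c _
          simp only [Function.comp]
          apply List.map_congr_left
          intro r hr
          have : r.isEmpty = false := by
            have := List.any_eq_false.mp h2' r hr
            simp only [Bool.not_eq_true] at this
            exact this
          cases r with
          | nil => simp at this
          | cons a t => simp

-- join over a list with one more piece at the end (used for the column-accumulation invariant)
theorem join_append_singleton (sep : List Char) (l : List (List Char)) (x : List Char) (h : l ≠ []) :
    PySem.Chars.join sep (l ++ [x]) = PySem.Chars.join sep l ++ sep ++ x := by
  induction l with
  | nil => exact absurd rfl h
  | cons p t ih =>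
    cases t with
    | nil => simp [PySem.Chars.join_cons_cons, PySem.Chars.join_singleton]
    | cons q r =>
      have h1 : (p :: q :: r) ++ [x] = p :: ((q :: r) ++ [x]) := by simp
      have h2 : PySem.Chars.join sep (p :: ((q :: r) ++ [x]))
          = p ++ sep ++ PySem.Chars.join sep ((q :: r) ++ [x]) := by
        rw [show (q :: r) ++ [x] = q :: (r ++ [x]) from rfl]
        exact PySem.Chars.join_cons_cons sep p q (r ++ [x])
      rw [h1, h2, ih (by simp), PySem.Chars.join_cons_cons sep p q r]
      simp

-- zipping two maps over the same list and mapping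
theorem zip_map_map {α β γ : Type} (xs : List α) (f h : α → β) (F : β × β → γ) :
    ((xs.map f).zip (xs.map h)).map F = xs.map (fun x => F (f x, h x)) := by
  induction xs with
  | nil => rfl
  | cons x t ih => simp [ih]

-- A's formatted prefix of a row, through the first k columns of widths W
def pvLineUpTo (W : Nat → Nat) (k : Nat) (row : List (List Char)) : List Char :=
  PySem.Chars.join [' ', '|', ' '] ((List.range k).map (fun i => pvPad (row.getD i []) (W i)))

-- the invariant of B's column fold: after k columns the partial lines are A's k-column prefixes
theorem fold_cols (g : List (List (List Char))) (W : Nat → Nat)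
    (hW : ∀ c, W c = (PySem.List.max? ((g.map (fun r => r.getD c [])).map List.length) (fun y => y)).getD 0)
    (k : Nat) :
    ((List.range k).map (fun c => g.map (fun r => r.getD c []))).foldl pvColStep
        (List.replicate g.length ([] : List Char), true)
      = (g.map (pvLineUpTo W k), k == 0) := by
  induction k with
  | zero =>
    have h0 : List.map (pvLineUpTo W 0) g = List.replicate g.length [] := by
      have hfun : pvLineUpTo W 0 = fun _ => ([] : List Char) := by
        funext row
        simp [pvLineUpTo, PySem.Chars.join_nil]
      rw [hfun, List.map_const']
    rw [List.range_zero, List.map_nil, List.foldl_nil, h0]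
    rfl
  | succ k ih =>
    rw [List.range_succ, List.map_append, List.foldl_append, ih]
    simp only [List.map_cons, List.map_nil, List.foldl_cons, List.foldl_nil]
    unfold pvColStep
    simp only []
    rw [← hW k, List.map_map, zip_map_map]
    cases k with
    | zero =>
      simp only [beq_self_eq_true, if_pos]
      congr 1
      apply List.map_congr_left
      intro r _
      simp [pvLineUpTo, List.range_succ, PySem.Chars.join_singleton, Function.comp]
    | succ k =>
      simp only [Nat.succ_ne_zero, beq_iff_eq, if_false]
      congr 1
      apply List.map_congr_left
      intro r _
      simp only [Function.comp]
      have hstep : pvLineUpTo W (k + 1 + 1) r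
          = pvLineUpTo W (k + 1) r ++ [' ', '|', ' '] ++ pvPad (r.getD (k + 1) []) (W (k + 1)) := by
        unfold pvLineUpTo
        rw [List.range_succ (n := k + 1), List.map_append, List.map_cons, List.map_nil,
            join_append_singleton _ _ _ (by simp)]
      exact hstep.symm

-- 'res.append' loop shape
theorem foldl_append_singleton {α β : Type} (f : α → β) (l : List α) (acc : List β) :
    l.foldl (fun r x => r ++ [f x]) acc = acc ++ l.map f := by
  induction l generalizing acc with
  | nil => simp
  | cons x t ih => simp [ih]

-- interior rows of the enumerate loop all take the '| {} |' branch
theorem map_enumerate_interior (E M : List Char → List Char) (N : Int)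
    (xs : List (List Char)) : ∀ s : Int, 1 ≤ s → s + xs.length ≤ N →
    (PySem.List.enumerate xs s).map (fun p => if p.1 = 0 ∨ p.1 = N then E p.2 else M p.2)
      = xs.map M := by
  induction xs with
  | nil => intro s _ _; simp [PySem.List.enumerate_nil]
  | cons x t ih =>
    intro s hs hN
    rw [PySem.List.enumerate_cons]
    simp only [List.map_cons, List.length_cons] at *
    have hcond : ¬ (s = 0 ∨ s = N) := by
      push_cast at hN
      omega
    rw [if_neg hcond, ih (s + 1) (by omega) (by push_cast at hN ⊢; omega)]

-- the whole enumerate loop: edge, interiors, edge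
theorem enumerate_edge_map (E M : List Char → List Char) (sep : List Char) (body : List (List Char)) :
    (PySem.List.enumerate (sep :: (body ++ [sep])) 0).map
      (fun p => if p.1 = 0 ∨ p.1 = (body.length : Int) + 1 then E p.2 else M p.2)
      = E sep :: body.map M ++ [E sep] := by
  rw [PySem.List.enumerate_cons, PySem.List.enumerate_append, PySem.List.enumerate_cons,
      PySem.List.enumerate_nil]
  simp only [List.map_cons, List.map_append, List.map_nil]
  rw [map_enumerate_interior E M ((body.length : Int) + 1) body (0 + 1) (by omega) (by omega)]
  have h2 : ((0 : Int) + 1 + (body.length : Int) = 0 ∨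
      (0 : Int) + 1 + (body.length : Int) = (body.length : Int) + 1) := Or.inr (by omega)
  rw [if_pos h2]
  simp

-- ===== VERDICT (by name: the statement is the Claim_ definition above) =====
theorem tabular_pretty_print_spec : Claim_equal_tabular_pretty_print := by
  intro grid _ hpre
  unfold Spec_tabular_pretty_print tabular_pretty_print tabular_pretty_print_alt
  simp only []
  set g := grid.map (fun row => row.map String.toList) with hg
  set m := pvMinLen g with hm
  set W : Nat → Nat := fun c =>
    (PySem.List.max? ((g.map (fun r => r.getD c [])).map List.length) (fun y => y)).getD 0 with hWdef
  -- A's widths list is the first m values of W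
  have hlens : (pvZipStar g).map (fun col => (PySem.List.max? (col.map List.length) (fun y => y)).getD 0)
      = (List.range m).map W := by
    rw [pvZipStar_eq, ← hm, List.map_map]
    rfl
  rw [hlens]
  -- A's table is the m-column prefix lines
  have htable : g.map (fun row =>
      PySem.Chars.join [' ', '|', ' ']
        ((List.range ((List.range m).map W).length).map
          (fun i => pvPad (row.getD i []) (((List.range m).map W).getD i 0))))
      = g.map (pvLineUpTo W m) := by
    apply List.map_congr_left
    intro row _
    unfold pvLineUpTo
    congr 1
    simp only [List.length_map, List.length_range]
    apply List.map_congr_left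
    intro i hi
    have hv : ((List.range m).map W).getD i 0 = W i := by
      rw [List.getD_eq_getElem?_getD, List.getElem?_map, List.getElem?_range (List.mem_range.mp hi)]
      rfl
    rw [hv]
  rw [htable]
  -- B's fold yields exactly those lines
  have hfold : (pvZipStar g).foldl pvColStep (List.replicate grid.length ([] : List Char), true)
      = (g.map (pvLineUpTo W m), m == 0) := by
    rw [pvZipStar_eq, ← hm]
    have hlen : grid.length = g.length := by simp [hg]
    rw [hlen]
    exact fold_cols g W (fun c => rfl) m
  rw [hfold]
  set body := g.map (pvLineUpTo W m) with hb
  set sep := List.replicate (body.headD []).length '~' with hsep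
  -- the enumerate loop over sep :: body ++ [sep] is edge, interiors, edge
  rw [foldl_append_singleton]
  simp only [List.nil_append]
  rw [show [sep] ++ body ++ [sep] = sep :: (body ++ [sep]) by simp]
  have hlen : ((sep :: (body ++ [sep])).length : Int) - 1 = (body.length : Int) + 1 := by
    simp
  rw [hlen]
  rw [enumerate_edge_map (fun l => ['*', ' '] ++ l ++ [' ', '*'])
        (fun l => ['|', ' '] ++ l ++ [' ', '|']) sep body]
  simp [List.map_map, Function.comp]
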